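-- pv_equiv track=rewrite | github.com/victorbenettimedeiros/ep2 | funcoes.py | calcula_pontos_quadra
-- ===== SOURCE A (Python) =====
-- def calcula_pontos_quadra (dados):
--   dic = {}
--   s = 0
--   for i in dados:
--     if i in dic:
--       dic[i] += 1
--     else:
--       dic[i] = 1
--     s += i
--   for n, qtd in dic.items():
--     if qtd >= 4:
--       return s
--   return 0
-- ===== SOURCE B (Python) =====
-- def calcula_pontos_quadra(dados):
--     xs = sorted(dados)
--     if any(a == b for a, b in zip(xs, xs[3:])):
--         return sum(dados)
--     return 0
-- ===== Notes on version B (the rewrite author's own statement) =====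
-- stated objective: alternative
-- what changed: Replaces the dict-counting pass plus items scan with sorting a copy and checking one adjacent window xs[i] == xs[i+3] in the sorted list, which holds iff some value occurs at least 4 times.
import Mathlib
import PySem

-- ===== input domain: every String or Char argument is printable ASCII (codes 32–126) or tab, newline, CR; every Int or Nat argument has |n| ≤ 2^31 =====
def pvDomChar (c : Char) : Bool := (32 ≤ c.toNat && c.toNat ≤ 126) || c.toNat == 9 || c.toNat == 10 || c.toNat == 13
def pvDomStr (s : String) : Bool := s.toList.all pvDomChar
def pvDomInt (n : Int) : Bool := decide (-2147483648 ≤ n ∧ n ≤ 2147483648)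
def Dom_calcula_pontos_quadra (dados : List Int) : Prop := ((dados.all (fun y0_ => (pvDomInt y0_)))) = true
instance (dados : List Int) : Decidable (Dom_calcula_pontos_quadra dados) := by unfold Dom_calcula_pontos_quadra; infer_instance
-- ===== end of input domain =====

-- B replaces A's dict-counting pass with sorting a copy and checking a window xs[i] == xs[i+3] (alternative algorithm, similar cost).

-- ===== PORT A =====
-- second loop of A: iterate dict items, return s on the first count ≥ 4, else 0
def pqScan (s : Int) : List (Int × Int) → Int
  | [] => 0
  | (_, qtd) :: rest => if 4 ≤ qtd then s else pqScan s rest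

def calcula_pontos_quadra (dados : List Int) : Int :=
  let st := dados.foldl
    (fun (acc : PySem.Dict Int Int × Int) i =>
      ( if acc.1.contains i then acc.1.insert i (acc.1.getD i 0 + 1)
        else acc.1.insert i 1,
        acc.2 + i))
    (PySem.Dict.empty, 0)
  pqScan st.2 st.1.items

-- ===== PORT B =====
def calcula_pontos_quadra_alt (dados : List Int) : Int :=
  let xs := PySem.List.sorted dados (fun x => x) false
  if (xs.zip (PySem.List.slice xs (some 3) none)).any (fun p => p.1 == p.2) then
    dados.sum
  else 0

-- ===== PRECONDITION & SPEC =====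
def Spec_calcula_pontos_quadra (dados : List Int) (out : Int) : Prop := out = calcula_pontos_quadra_alt dados
instance (dados : List Int) (out : Int) : Decidable (Spec_calcula_pontos_quadra dados out) := by unfold Spec_calcula_pontos_quadra; infer_instance

-- ===== CLAIM (what is proved, stated in full; the proofs are below) =====
def Claim_equal_calcula_pontos_quadra : Prop := ∀ (dados : List Int), Dom_calcula_pontos_quadra dados → Spec_calcula_pontos_quadra dados (calcula_pontos_quadra dados)

-- ===== LEMMAS AND PROOFS =====

-- A's insert branches collapse to the standard counting insert
theorem pq_branch (d : PySem.Dict Int Int) (i : Int) :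
    (if d.contains i then d.insert i (d.getD i 0 + 1) else d.insert i 1)
      = d.insert i (d.getD i 0 + 1) := by
  by_cases h : d.contains i = true
  · simp [h]
  · simp only [Bool.not_eq_true] at h
    rw [if_neg (by simp [h]), PySem.Dict.getD_of_not_contains d 0 h]
    norm_num

-- the scan over mapped counts is the 'any' test
theorem pqScan_map (s : Int) (xs : List Int) (l : List Int) :
    pqScan s (l.map (fun k => (k, (xs.count k : Int))))
      = if l.any (fun k => decide (4 ≤ xs.count k)) then s else 0 := by
  induction l with
  | nil => simp [pqScan]
  | cons k rest ih =>
      simp only [List.map_cons, pqScan, List.any_cons, ih]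
      by_cases h : 4 ≤ xs.count k
      · have : (4 : Int) ≤ (xs.count k : Int) := by exact_mod_cast h
        simp [h, this]
      · have : ¬ (4 : Int) ≤ (xs.count k : Int) := by exact_mod_cast h
        simp [h, this]

theorem any_ofList (xs : List Int) (p : Int → Bool) :
    (PySem.Set.ofList xs).any p = xs.any p := by
  rw [Bool.eq_iff_iff]
  simp only [List.any_eq_true]
  constructor
  · rintro ⟨x, hx, hp⟩
    exact ⟨x, (PySem.Set.mem_ofList xs x).1 hx, hp⟩
  · rintro ⟨x, hx, hp⟩
    exact ⟨x, (PySem.Set.mem_ofList xs x).2 hx, hp⟩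

-- A computes: the sum if some value has count ≥ 4, else 0
theorem A_char (dados : List Int) :
    calcula_pontos_quadra dados
      = if dados.any (fun x => decide (4 ≤ dados.count x)) then dados.sum else 0 := by
  unfold calcula_pontos_quadra
  have hbody :
      dados.foldl
        (fun (acc : PySem.Dict Int Int × Int) i =>
          ( if acc.1.contains i then acc.1.insert i (acc.1.getD i 0 + 1)
            else acc.1.insert i 1,
            acc.2 + i))
        (PySem.Dict.empty, 0)
      = (PySem.Dict.counter dados, dados.sum) := by
    have := PySem.List.foldl_prod_mk
      (fun (d : PySem.Dict Int Int) (i : Int) => d.insert i (d.getD i 0 + 1))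
      (fun (s : Int) (i : Int) => s + i) dados PySem.Dict.empty 0
    calc dados.foldl
          (fun (acc : PySem.Dict Int Int × Int) i =>
            ( if acc.1.contains i then acc.1.insert i (acc.1.getD i 0 + 1)
              else acc.1.insert i 1,
              acc.2 + i))
          (PySem.Dict.empty, 0)
        = dados.foldl
            (fun (acc : PySem.Dict Int Int × Int) i =>
              (acc.1.insert i (acc.1.getD i 0 + 1), acc.2 + i))
            (PySem.Dict.empty, 0) := by
          apply List.foldl_ext
          intro acc i _
          rw [pq_branch]
      _ = (dados.foldl (fun d i => d.insert i (d.getD i 0 + 1)) PySem.Dict.empty,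
           dados.foldl (fun s i => s + i) 0) := this
      _ = (PySem.Dict.counter dados, dados.sum) := by
          rw [PySem.Dict.foldl_insert_getD_add_one_eq_counter]
          congr 1
          exact List.sum_eq_foldl.symm
  simp only [hbody, PySem.Dict.items_counter, pqScan_map, any_ofList]

-- in a ≤-sorted list whose elements are all ≥ v, the v's form a prefix block of length count
theorem replicate_count_prefix (v : Int) (ys : List Int)
    (hs : ys.Pairwise (· ≤ ·)) (hge : ∀ x ∈ ys, v ≤ x) :
    List.replicate (ys.count v) v <+: ys := by
  induction ys with
  | nil => simp
  | cons a t ih =>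
      have hst : t.Pairwise (· ≤ ·) := hs.of_cons
      have hat : ∀ x ∈ t, a ≤ x := (List.pairwise_cons.1 hs).1
      by_cases hav : a = v
      · subst hav
        have hpre : List.replicate (t.count a) a <+: t :=
          ih hst (fun x hx => hat x hx)
        rw [List.count_cons_self, List.replicate_succ]
        exact List.cons_prefix_cons.2 ⟨rfl, hpre⟩
      · have hcount0 : t.count v = 0 := by
          rw [List.count_eq_zero]
          intro hv
          have h1 : v ≤ a := hge a (by simp)
          have h2 : a ≤ v := hat v hv
          exact hav (le_antisymm h2 h1)
        rw [List.count_cons_of_ne hav, hcount0]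
        simp

-- in a ≤-sorted list the v's form a contiguous block of length count
theorem replicate_count_infix (v : Int) (ys : List Int)
    (hs : ys.Pairwise (· ≤ ·)) :
    List.replicate (ys.count v) v <:+: ys := by
  induction ys with
  | nil => simp
  | cons a t ih =>
      have hst : t.Pairwise (· ≤ ·) := hs.of_cons
      have hat : ∀ x ∈ t, a ≤ x := (List.pairwise_cons.1 hs).1
      by_cases hav : a = v
      · subst hav
        have hge : ∀ x ∈ a :: t, a ≤ x := by
          intro x hx
          rcases List.mem_cons.1 hx with h | h
          · exact le_of_eq h.symm
          · exact hat x h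
        exact (replicate_count_prefix a (a :: t) hs hge).isInfix
      · rw [List.count_cons_of_ne hav]
        exact List.infix_cons (ih hst)

-- monotone access into a ≤-sorted list
theorem sorted_getElem_mono (ys : List Int) (hs : ys.Pairwise (· ≤ ·))
    (p q : Nat) (hpq : p ≤ q) (hq : q < ys.length) :
    ys[p]'(lt_of_le_of_lt hpq hq) ≤ ys[q] := by
  rcases Nat.lt_or_ge p q with h | h
  · exact List.pairwise_iff_getElem.1 hs p q (lt_of_le_of_lt hpq hq) hq h
  · have : p = q := le_antisymm hpq h
    subst this
    exact le_refl _

-- the sorted-window test is exactly "some value occurs ≥ 4 times"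
theorem window_iff_count (ys : List Int) (hs : ys.Pairwise (· ≤ ·)) :
    ((ys.zip (ys.drop 3)).any (fun p => p.1 == p.2) = true)
      ↔ ∃ v, 4 ≤ ys.count v := by
  constructor
  · intro h
    rcases List.any_eq_true.1 h with ⟨p, hp, heq⟩
    rcases List.mem_iff_getElem.1 hp with ⟨i, hi, hgi⟩
    have hlen : i + 3 < ys.length := by
      have := hi
      simp only [List.length_zip, List.length_drop] at this
      omega
    have hi1 : i < ys.length := by omega
    have hzi : (ys.zip (ys.drop 3))[i] = (ys[i], ys[i + 3]) := by
      rw [List.getElem_zip]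
      congr 1
      rw [List.getElem_drop]
      congr 1
      omega
    have hp2 : p = (ys[i], ys[i + 3]) := by rw [← hgi, hzi]
    have heq2 : ys[i] = ys[i + 3] := by
      rw [hp2] at heq
      simpa using heq
    refine ⟨ys[i], ?_⟩
    have hblock : (ys.drop i).take 4 = List.replicate 4 (ys[i]'hi1) := by
      apply List.ext_getElem
      · simp only [List.length_take, List.length_drop, List.length_replicate]
        omega
      · intro j hj _
        have hj4 : j < 4 := by
          simp only [List.length_take, List.length_drop] at hj
          omega
        rw [List.getElem_take, List.getElem_drop, List.getElem_replicate]
        have h1 : ys[i] ≤ ys[i + j]'(by omega) :=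
          sorted_getElem_mono ys hs i (i + j) (by omega) (by omega)
        have h2 : ys[i + j]'(by omega) ≤ ys[i + 3] :=
          sorted_getElem_mono ys hs (i + j) (i + 3) (by omega) hlen
        omega
    have hsub : ((ys.drop i).take 4).Sublist ys :=
      (List.take_sublist _ _).trans (List.drop_sublist _ _)
    have := hsub.count_le (ys[i]'hi1)
    rw [hblock] at this
    simpa using this
  · rintro ⟨v, hv⟩
    have hinf : List.replicate (ys.count v) v <:+: ys :=
      replicate_count_infix v ys hs
    obtain ⟨n, hn⟩ : ∃ n, ys.count v = n := ⟨_, rfl⟩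
    rw [hn] at hinf hv
    rcases hinf with ⟨s, t, hst⟩
    have hsplit : List.replicate n v
        = List.replicate 4 v ++ List.replicate (n - 4) v := by
      rw [← List.replicate_add]
      congr 1
      omega
    have hys : ys = s ++ (List.replicate 4 v ++ (List.replicate (n - 4) v ++ t)) := by
      rw [← hst, hsplit]
      simp [List.append_assoc]
    have hlen : ys.length = s.length + 4 + (n - 4) + t.length := by
      rw [hys]; simp; omega
    have hi3 : s.length + 3 < ys.length := by omega
    have hizip : s.length < (ys.zip (ys.drop 3)).length := by
      simp only [List.length_zip, List.length_drop]
      omega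
    apply List.any_eq_true.2
    refine ⟨(ys.zip (ys.drop 3))[s.length], List.getElem_mem _, ?_⟩
    have hzi : (ys.zip (ys.drop 3))[s.length]
        = (ys[s.length]'(by omega), ys[s.length + 3]'hi3) := by
      rw [List.getElem_zip]
      congr 1
      rw [List.getElem_drop]
      congr 1
      omega
    have hv1 : ys[s.length]'(by omega) = v := by
      rw [List.getElem_of_eq hys]
      rw [List.getElem_append_right (le_refl s.length)]
      simp
    have hv2 : ys[s.length + 3]'hi3 = v := by
      rw [List.getElem_of_eq hys]
      rw [List.getElem_append_right (by omega : s.length ≤ s.length + 3)]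
      have : s.length + 3 - s.length = 3 := by omega
      rw [List.getElem_append_left]
      · exact List.getElem_replicate ..
      · simp [this]
    rw [hzi]
    simp [hv1, hv2]

-- ===== VERDICT (by name: the statement is the Claim_ definition above) =====
theorem calcula_pontos_quadra_spec : Claim_equal_calcula_pontos_quadra := by
  intro dados _
  unfold Spec_calcula_pontos_quadra
  simp only [calcula_pontos_quadra_alt]
  rw [A_char]
  have hdrop : PySem.List.slice (PySem.List.sorted dados (fun x => x) false) (some 3) none
      = (PySem.List.sorted dados (fun x => x) false).drop 3 := by
    exact_mod_cast PySem.List.slice_from_natCast (PySem.List.sorted dados (fun x => x) false) 3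
  rw [hdrop]
  have hperm : (PySem.List.sorted dados (fun x => x) false).Perm dados :=
    PySem.List.sorted_perm dados (fun x => x) false
  have hs : (PySem.List.sorted dados (fun x => x) false).Pairwise (· ≤ ·) := by
    simpa using PySem.List.sorted_pairwise dados (fun x => x)
  have hiff := window_iff_count (PySem.List.sorted dados (fun x => x) false) hs
  have hany : dados.any (fun x => decide (4 ≤ dados.count x))
      = ((PySem.List.sorted dados (fun x => x) false).zip
          ((PySem.List.sorted dados (fun x => x) false).drop 3)).any (fun p => p.1 == p.2) := by
    rw [Bool.eq_iff_iff]
    rw [hiff]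
    simp only [List.any_eq_true, decide_eq_true_eq]
    constructor
    · rintro ⟨x, _, hx⟩
      exact ⟨x, by rw [hperm.count_eq]; exact hx⟩
    · rintro ⟨v, hv⟩
      rw [hperm.count_eq] at hv
      have hmem : v ∈ dados := by
        rw [← List.count_pos_iff]
        omega
      exact ⟨v, hmem, hv⟩
  rw [hany]
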